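-- pv_equiv track=rewrite | github.com/HaymayndzUltra/voice-assistant-prod | workflow_memory_intelligence_strategy.py | _order_steps
-- ===== SOURCE A (Python) =====
-- from typing import Dict, Any, List, Optional, Protocol, Tuple
--
-- def _order_steps(steps: List[str]) -> List[str]:
--     """Order steps logically"""
--     regular_steps = []
--     parallel_steps = []
--     conditional_steps = []
--
--     for step in steps:
--         if '[CONDITIONAL]' in step:
--             conditional_steps.append(step)
--         elif '[PARALLEL]' in step:
--             parallel_steps.append(step)
--         else:
--             regular_steps.append(step)
--
--     # Order: regular -> parallel -> conditional
--     return regular_steps + parallel_steps + conditional_steps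
-- ===== SOURCE B (Python) =====
-- def _order_steps(steps):
--     """Order steps logically"""
--     def priority(step):
--         if '[CONDITIONAL]' in step:
--             return 2
--         if '[PARALLEL]' in step:
--             return 1
--         return 0
--     return sorted(steps, key=priority)
-- ===== Notes on version B (the rewrite author's own statement) =====
-- stated objective: idiomatic
-- what changed: Replaced the three accumulator lists and the partitioning loop with a single stable sort by a 0/1/2 priority key (conditional checked before parallel), relying on sort stability to preserve in-class order.
import Mathlib
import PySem

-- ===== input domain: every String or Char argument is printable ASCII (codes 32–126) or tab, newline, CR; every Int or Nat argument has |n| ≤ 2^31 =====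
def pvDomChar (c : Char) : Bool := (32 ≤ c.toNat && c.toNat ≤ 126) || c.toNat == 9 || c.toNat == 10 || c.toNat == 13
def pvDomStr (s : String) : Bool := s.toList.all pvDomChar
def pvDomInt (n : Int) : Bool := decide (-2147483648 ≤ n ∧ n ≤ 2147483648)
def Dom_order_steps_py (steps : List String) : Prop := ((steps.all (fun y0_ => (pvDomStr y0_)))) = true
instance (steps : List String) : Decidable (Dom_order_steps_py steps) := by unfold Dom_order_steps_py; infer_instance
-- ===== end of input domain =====

-- B replaces A's three-list partitioning loop with one stable sort by a 0/1/2 priority key (idiomatic; same result proved below).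


-- ===== PORT A =====
-- three accumulator lists, one pass, then concatenation (literal transliteration of A)
def order_steps_py (steps : List String) : List String :=
  let st := steps.foldl
    (fun (acc : List String × List String × List String) step =>
      if PySem.Str.isIn "[CONDITIONAL]" step then (acc.1, acc.2.1, acc.2.2 ++ [step])
      else if PySem.Str.isIn "[PARALLEL]" step then (acc.1, acc.2.1 ++ [step], acc.2.2)
      else (acc.1 ++ [step], acc.2.1, acc.2.2))
    ([], [], [])
  st.1 ++ st.2.1 ++ st.2.2

-- ===== PORT B =====
-- priority key: 2 for conditional, 1 for parallel, 0 otherwise (conditional checked first)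
def pvPriority (step : String) : Int :=
  if PySem.Str.isIn "[CONDITIONAL]" step then 2
  else if PySem.Str.isIn "[PARALLEL]" step then 1
  else 0

def order_steps_py_alt (steps : List String) : List String :=
  PySem.List.sorted steps pvPriority

-- ===== PRECONDITION & SPEC =====
def Spec_order_steps_py (steps : List String) (out : List String) : Prop := out = order_steps_py_alt steps
instance (steps : List String) (out : List String) : Decidable (Spec_order_steps_py steps out) := by unfold Spec_order_steps_py; infer_instance

-- ===== CLAIM (what is proved, stated in full; the proofs are below) =====
def Claim_equal_order_steps_py : Prop := ∀ (steps : List String), Dom_order_steps_py steps → Spec_order_steps_py steps (order_steps_py steps)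

-- ===== LEMMAS AND PROOFS =====

-- insertBy puts x in front when every element satisfies `before`
theorem pv_insertBy_eq_cons (x : String) (R : List String)
    (h : ∀ y ∈ R, pvPriority x < pvPriority y) :
    PySem.List.insertBy (fun a b => decide (pvPriority a < pvPriority b)) x R = x :: R := by
  cases R with
  | nil => simp [PySem.List.insertBy]
  | cons y ys => simp [PySem.List.insertBy, h y (by simp)]

-- insertBy walks past a prefix whose elements all fail `before`
theorem pv_insertBy_skip {α : Type} (before : α → α → Bool) (x : α) (L R : List α)
    (h : ∀ y ∈ L, before x y = false) :
    PySem.List.insertBy before x (L ++ R) = L ++ PySem.List.insertBy before x R := by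
  induction L with
  | nil => simp
  | cons y ys ih =>
      simp only [List.cons_append, PySem.List.insertBy, h y (by simp)]
      simp only [Bool.false_eq_true, if_false]
      exact congrArg (y :: ·) (ih (fun z hz => h z (by simp [hz])))

-- the stable insertion-sort fold, started from a partitioned accumulator, stays partitioned
theorem pv_sorted_inv (xs : List String) : ∀ (A0 A1 A2 : List String),
    (∀ y ∈ A0, pvPriority y = 0) → (∀ y ∈ A1, pvPriority y = 1) → (∀ y ∈ A2, pvPriority y = 2) →
    xs.foldl (fun acc x => PySem.List.insertBy (fun a b => decide (pvPriority a < pvPriority b)) x acc)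
      (A0 ++ (A1 ++ A2)) =
    (A0 ++ xs.filter (fun s => pvPriority s = 0)) ++
      ((A1 ++ xs.filter (fun s => pvPriority s = 1)) ++ (A2 ++ xs.filter (fun s => pvPriority s = 2))) := by
  induction xs with
  | nil => intro A0 A1 A2 _ _ _; simp
  | cons x xs ih =>
      intro A0 A1 A2 h0 h1 h2
      have hk : pvPriority x = 0 ∨ pvPriority x = 1 ∨ pvPriority x = 2 := by
        unfold pvPriority; split_ifs <;> simp
      rcases hk with hk | hk | hk
      · -- x goes right after A0
        have hskip0 : ∀ y ∈ A0, decide (pvPriority x < pvPriority y) = false := by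
          intro y hy; simp [hk, h0 y hy]
        have hgt : ∀ y ∈ A1 ++ A2, pvPriority x < pvPriority y := by
          intro y hy
          rcases List.mem_append.1 hy with h | h
          · rw [h1 y h, hk]; omega
          · rw [h2 y h, hk]; omega
        have hins : PySem.List.insertBy (fun a b => decide (pvPriority a < pvPriority b)) x (A0 ++ (A1 ++ A2))
            = (A0 ++ [x]) ++ (A1 ++ A2) := by
          rw [pv_insertBy_skip _ x A0 (A1 ++ A2) hskip0, pv_insertBy_eq_cons x _ hgt]; simp
        have hA0' : ∀ y ∈ A0 ++ [x], pvPriority y = 0 := by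
          intro y hy
          rcases List.mem_append.1 hy with h | h
          · exact h0 y h
          · simp at h; simp [h, hk]
        rw [List.foldl_cons, hins, ih (A0 ++ [x]) A1 A2 hA0' h1 h2]
        simp [hk]
      · -- x goes right after A1
        have hskip0 : ∀ y ∈ A0, decide (pvPriority x < pvPriority y) = false := by
          intro y hy; simp [hk, h0 y hy]
        have hskip1 : ∀ y ∈ A1, decide (pvPriority x < pvPriority y) = false := by
          intro y hy; simp [hk, h1 y hy]
        have hgt : ∀ y ∈ A2, pvPriority x < pvPriority y := by
          intro y hy; rw [h2 y hy, hk]; omega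
        have hins : PySem.List.insertBy (fun a b => decide (pvPriority a < pvPriority b)) x (A0 ++ (A1 ++ A2))
            = A0 ++ ((A1 ++ [x]) ++ A2) := by
          rw [pv_insertBy_skip _ x A0 (A1 ++ A2) hskip0, pv_insertBy_skip _ x A1 A2 hskip1,
              pv_insertBy_eq_cons x _ hgt]
          simp
        have hA1' : ∀ y ∈ A1 ++ [x], pvPriority y = 1 := by
          intro y hy
          rcases List.mem_append.1 hy with h | h
          · exact h1 y h
          · simp at h; simp [h, hk]
        rw [List.foldl_cons, hins, ih A0 (A1 ++ [x]) A2 h0 hA1' h2]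
        simp [hk]
      · -- x goes at the very end
        have hskip0 : ∀ y ∈ A0, decide (pvPriority x < pvPriority y) = false := by
          intro y hy; simp [hk, h0 y hy]
        have hskip1 : ∀ y ∈ A1, decide (pvPriority x < pvPriority y) = false := by
          intro y hy; simp [hk, h1 y hy]
        have hskip2 : ∀ y ∈ A2, decide (pvPriority x < pvPriority y) = false := by
          intro y hy; simp [hk, h2 y hy]
        have hins : PySem.List.insertBy (fun a b => decide (pvPriority a < pvPriority b)) x (A0 ++ (A1 ++ A2))
            = A0 ++ (A1 ++ (A2 ++ [x])) := by
          have hlast : PySem.List.insertBy (fun a b => decide (pvPriority a < pvPriority b)) x A2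
              = A2 ++ [x] := by
            have := pv_insertBy_skip (fun a b => decide (pvPriority a < pvPriority b)) x A2 [] hskip2
            simpa [PySem.List.insertBy] using this
          rw [pv_insertBy_skip _ x A0 (A1 ++ A2) hskip0, pv_insertBy_skip _ x A1 A2 hskip1, hlast]
        have hA2' : ∀ y ∈ A2 ++ [x], pvPriority y = 2 := by
          intro y hy
          rcases List.mem_append.1 hy with h | h
          · exact h2 y h
          · simp at h; simp [h, hk]
        rw [List.foldl_cons, hins, ih A0 A1 (A2 ++ [x]) h0 h1 hA2']
        simp [hk]

-- B's sort is the three filters concatenated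
theorem pv_alt_eq_filters (steps : List String) :
    order_steps_py_alt steps =
      steps.filter (fun s => pvPriority s = 0) ++
        steps.filter (fun s => pvPriority s = 1) ++ steps.filter (fun s => pvPriority s = 2) := by
  unfold order_steps_py_alt
  rw [PySem.List.sorted_eq_foldl_insertBy]
  have := pv_sorted_inv steps [] [] [] (by simp) (by simp) (by simp)
  simpa using this

-- A's partitioning fold, from an arbitrary triple, appends the three filters
theorem pv_a_inv (xs : List String) : ∀ (r p c : List String),
    xs.foldl
      (fun (acc : List String × List String × List String) step =>
        if PySem.Str.isIn "[CONDITIONAL]" step then (acc.1, acc.2.1, acc.2.2 ++ [step])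
        else if PySem.Str.isIn "[PARALLEL]" step then (acc.1, acc.2.1 ++ [step], acc.2.2)
        else (acc.1 ++ [step], acc.2.1, acc.2.2))
      (r, p, c) =
    (r ++ xs.filter (fun s => pvPriority s = 0),
     p ++ xs.filter (fun s => pvPriority s = 1),
     c ++ xs.filter (fun s => pvPriority s = 2)) := by
  induction xs with
  | nil => intro r p c; simp
  | cons x xs ih =>
      intro r p c
      by_cases hc : PySem.Str.isIn "[CONDITIONAL]" x = true
      · have hk : pvPriority x = 2 := by unfold pvPriority; rw [if_pos hc]
        simp only [List.foldl_cons, hc, if_true]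
        rw [ih]
        simp [hk]
      · by_cases hp : PySem.Str.isIn "[PARALLEL]" x = true
        · have hk : pvPriority x = 1 := by unfold pvPriority; rw [if_neg hc, if_pos hp]
          simp only [List.foldl_cons, hc, hp, Bool.false_eq_true, if_false, if_true]
          rw [ih]
          simp [hk]
        · have hk : pvPriority x = 0 := by unfold pvPriority; rw [if_neg hc, if_neg hp]
          simp only [List.foldl_cons, hc, hp, Bool.false_eq_true, if_false]
          rw [ih]
          simp [hk]

-- ===== VERDICT (by name: the statement is the Claim_ definition above) =====
theorem order_steps_py_spec : Claim_equal_order_steps_py := by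
  intro steps _
  unfold Spec_order_steps_py order_steps_py
  rw [pv_a_inv steps [] [] [], pv_alt_eq_filters]
  simp
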